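-- pv_equiv track=rewrite | github.com/Batmansanty49/unam.fi.compilers.g5.06 | mx/unam/fi/compilers/g5/src/main/lexer.py | _advance_position
-- ===== SOURCE A (Python) =====
-- def _advance_position(fragment: str, line: int, column: int) -> tuple[int, int]:
--     for char in fragment:
--         if char == "\n":
--             line += 1
--             column = 1
--         else:
--             column += 1
--     return line, column
-- ===== SOURCE B (Python) =====
-- def _advance_position(fragment: str, line: int, column: int) -> tuple[int, int]:
--     n = fragment.count("\n")
--     if n == 0:
--         return line, column + len(fragment)
--     return line + n, len(fragment) - fragment.rfind("\n")
-- ===== Notes on version B (the rewrite author's own statement) =====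
-- stated objective: faster
-- what changed: Replaces the explicit per-character Python loop with arithmetic over two C-level library scans: count('\n') gives the line increment and rfind('\n') gives the column after the last newline.
import Mathlib
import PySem

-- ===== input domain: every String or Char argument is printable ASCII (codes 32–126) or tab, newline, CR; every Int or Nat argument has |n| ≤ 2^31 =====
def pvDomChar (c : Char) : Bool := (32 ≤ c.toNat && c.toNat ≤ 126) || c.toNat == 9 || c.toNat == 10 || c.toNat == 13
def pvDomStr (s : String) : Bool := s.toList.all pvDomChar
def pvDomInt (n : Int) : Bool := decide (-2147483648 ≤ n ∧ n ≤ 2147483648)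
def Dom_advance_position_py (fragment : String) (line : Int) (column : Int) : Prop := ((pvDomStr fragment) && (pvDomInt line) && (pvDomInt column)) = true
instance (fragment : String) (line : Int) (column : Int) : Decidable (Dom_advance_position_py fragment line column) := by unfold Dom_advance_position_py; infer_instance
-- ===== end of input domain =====

-- B replaces A's per-character loop with arithmetic over two library string scans (count of newlines, rfind of the last one); measured faster in a timing run (constant factor).

-- ===== PORT A =====
-- the for-loop over the characters, carrying (line, column)
def advance_position_py (fragment : String) (line : Int) (column : Int) : Int × Int :=
  fragment.toList.foldl
    (fun lc ch => if ch == '\n' then (lc.1 + 1, 1) else (lc.1, lc.2 + 1))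
    (line, column)

-- ===== PORT B =====
-- n = fragment.count("\n"); no newline → add len(fragment) to column; else column = len(fragment) - rfind("\n")
def advance_position_py_alt (fragment : String) (line : Int) (column : Int) : Int × Int :=
  let n : Nat := PySem.Str.count fragment "\n"
  if n = 0 then (line, column + PySem.Str.len fragment)
  else (line + n, PySem.Str.len fragment - PySem.Str.rfind fragment "\n")

-- ===== PRECONDITION & SPEC =====
def Spec_advance_position_py (fragment : String) (line : Int) (column : Int) (out : Int × Int) : Prop := out = advance_position_py_alt fragment line column
instance (fragment : String) (line : Int) (column : Int) (out : Int × Int) : Decidable (Spec_advance_position_py fragment line column out) := by unfold Spec_advance_position_py; infer_instance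

-- ===== CLAIM (what is proved, stated in full; the proofs are below) =====
def Claim_equal_advance_position_py : Prop := ∀ (fragment : String) (line : Int) (column : Int), Dom_advance_position_py fragment line column → Spec_advance_position_py fragment line column (advance_position_py fragment line column)

-- ===== LEMMAS AND PROOFS =====

-- number of characters after the last '\n' (all of them if there is none)
def pvTail (cs : List Char) : Nat := (cs.reverse.takeWhile (fun c => c != '\n')).length

theorem pvTail_append_nl (cs : List Char) : pvTail (cs ++ ['\n']) = 0 := by
  simp [pvTail]

theorem pvTail_append_other (cs : List Char) (x : Char) (hx : x ≠ '\n') :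
    pvTail (cs ++ [x]) = pvTail cs + 1 := by
  simp [pvTail, hx]

theorem pvPrefix_single (c : Char) (l : List Char) : [c].isPrefixOf l = (l.head? == some c) := by
  cases l with
  | nil => simp [List.isPrefixOf]
  | cons h t => simp [List.isPrefixOf, eq_comm]

theorem pvCount_go (cs : List Char) : ∀ (fuel acc : Nat), cs.length ≤ fuel →
    PySem.Chars.count.go ['\n'] fuel cs acc = acc + cs.count '\n' := by
  induction cs with
  | nil => intro fuel acc h; cases fuel <;> simp [PySem.Chars.count.go]
  | cons x t ih =>
    intro fuel acc h
    cases fuel with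
    | zero => simp at h
    | succ f =>
      simp only [PySem.Chars.count.go, pvPrefix_single, List.head?]
      by_cases hx : x = '\n'
      · subst hx
        simp only [beq_self_eq_true, if_pos]
        have hd : List.drop ['\n'].length ('\n' :: t) = t := rfl
        rw [hd, ih f (acc+1) (by simpa using h), List.count_cons]
        simp; ring
      · rw [if_neg (by simp [hx]), ih f acc (by simpa using h), List.count_cons]
        simp [hx]

theorem pvCount_single (cs : List Char) : PySem.Chars.count cs ['\n'] = cs.count '\n' := by
  have := pvCount_go cs cs.length 0 le_rfl
  simpa [PySem.Chars.count, List.isEmpty] using this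

theorem pvRfind_go_append (cs : List Char) (x : Char) (hx : x ≠ '\n') :
    ∀ j, j ≤ cs.length → PySem.Chars.rfind.go (cs ++ [x]) ['\n'] j = PySem.Chars.rfind.go cs ['\n'] j := by
  intro j
  induction j with
  | zero =>
    intro _
    simp only [PySem.Chars.rfind.go, pvPrefix_single]
    cases cs with
    | nil => simp [hx]
    | cons a t => simp
  | succ k ih =>
    intro h
    simp only [PySem.Chars.rfind.go, pvPrefix_single]
    have e : (((cs ++ [x]).drop (k+1)).head? == some '\n') = ((cs.drop (k+1)).head? == some '\n') := by
      rw [List.head?_drop, List.head?_drop]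
      rcases Nat.lt_or_ge (k+1) cs.length with hlt | hge
      · rw [List.getElem?_append_left hlt]
      · have he : k + 1 = cs.length := le_antisymm h hge
        rw [he, List.getElem?_append_right le_rfl]
        simp [hx]
    rw [e]
    split
    · rfl
    · exact ih (by omega)

theorem pvRfind_go_last (s : List Char) (j : Nat) (h : (s.drop j).head? = some '\n') :
    PySem.Chars.rfind.go s ['\n'] j = (j : Int) := by
  cases j with
  | zero =>
    simp only [List.drop_zero] at h
    simp [PySem.Chars.rfind.go, pvPrefix_single, h]
  | succ k =>
    simp [PySem.Chars.rfind.go, pvPrefix_single, h]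

theorem pvRfind_append (cs : List Char) (x : Char) :
    PySem.Chars.rfind (cs ++ [x]) ['\n'] =
      if x = '\n' then (cs.length : Int) else PySem.Chars.rfind cs ['\n'] := by
  have hlen : (cs ++ [x]).length = cs.length + 1 := by simp
  unfold PySem.Chars.rfind
  rw [hlen]
  simp only [PySem.Chars.rfind.go, pvPrefix_single]
  rw [List.head?_drop]
  have h1 : (cs ++ [x])[cs.length + 1]? = none := by simp
  rw [h1]
  have h2 : ((none : Option Char) == some '\n') = false := rfl
  rw [h2]
  simp only [Bool.false_eq_true, if_false]
  by_cases hx : x = '\n'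
  · subst hx
    rw [if_pos rfl]
    apply pvRfind_go_last
    rw [List.head?_drop, List.getElem?_append_right le_rfl]
    simp
  · rw [if_neg hx, pvRfind_go_append cs x hx cs.length le_rfl]

theorem pvRfind_char (cs : List Char) (h : cs.count '\n' ≠ 0) :
    PySem.Chars.rfind cs ['\n'] = (cs.length : Int) - 1 - pvTail cs := by
  induction cs using List.reverseRecOn with
  | nil => simp at h
  | append_singleton cs x ih =>
    rw [pvRfind_append]
    by_cases hx : x = '\n'
    · subst hx
      rw [if_pos rfl, pvTail_append_nl]
      simp
    · rw [if_neg hx, pvTail_append_other cs x hx,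
        ih (by simpa [List.count_append, List.count_singleton, hx] using h)]
      simp
      ring

theorem pvA_char (cs : List Char) (l c : Int) :
    cs.foldl (fun lc ch => if ch == '\n' then (lc.1 + 1, 1) else (lc.1, lc.2 + 1)) (l, c) =
      (l + cs.count '\n',
       if cs.count '\n' = 0 then c + cs.length else 1 + (pvTail cs : Int)) := by
  induction cs using List.reverseRecOn generalizing l c with
  | nil => simp
  | append_singleton cs x ih =>
    rw [List.foldl_append, ih]
    by_cases hx : x = '\n'
    · subst hx
      simp only [List.foldl_cons, List.foldl_nil, beq_self_eq_true, if_pos, pvTail_append_nl,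
        List.count_append, List.count_singleton]
      rw [if_neg (by omega)]
      simp only [Prod.mk.injEq]
      push_cast
      constructor <;> first | trivial | omega
    · simp only [List.foldl_cons, List.foldl_nil, List.count_append, List.count_singleton,
        pvTail_append_other cs x hx, if_neg (by simp [hx] : ¬ (x == '\n') = true)]
      simp only [Nat.add_zero]
      split_ifs with h0 <;>
        simp only [Prod.mk.injEq, List.length_append, List.length_singleton] <;>
        push_cast <;> constructor <;> first | trivial | omega

-- ===== VERDICT (by name: the statement is the Claim_ definition above) =====
theorem advance_position_py_spec : Claim_equal_advance_position_py := by
  intro fragment line column _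
  unfold Spec_advance_position_py advance_position_py advance_position_py_alt
  have hb : ("\n" : String).toList = ['\n'] := rfl
  rw [PySem.Str.count_eq, PySem.Str.rfind_eq, PySem.Str.len_eq, hb, pvCount_single, pvA_char]
  by_cases h0 : fragment.toList.count '\n' = 0
  · simp [h0]
  · rw [if_neg h0, if_neg h0, pvRfind_char fragment.toList h0]
    simp only [Prod.mk.injEq]
    exact ⟨trivial, by ring⟩
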